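-- pv_equiv track=rewrite | github.com/Mahmoud3mmar/Security-Chat-System | AES2.py | Plain_to_Binary
-- ===== SOURCE A (Python) =====
-- def Plain_to_Binary(plaintext):
--     binary_blocks = []
--     for i in range(0, len(plaintext), 2):
--         if i+1 < len(plaintext):
--             # If there are two characters left in plaintext
--             binary_block = format(ord(plaintext[i]), '08b') + format(ord(plaintext[i+1]), '08b')
--         else:
--             # If there is only one character left in plaintext
--             binary_block = format(ord(plaintext[i]), '08b') + '00000000'
--         binary_blocks.append(binary_block)
--     return binary_blocks
-- ===== SOURCE B (Python) =====
-- def Plain_to_Binary(plaintext):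
--     s = ''.join(format(ord(c), '08b') for c in plaintext)
--     s += '0' * ((-len(s)) % 16)
--     blocks = []
--     i = 0
--     while i < len(s):
--         blocks.append(s[i:i+16])
--         i += 16
--     return blocks
-- ===== Notes on version B (the rewrite author's own statement) =====
-- stated objective: simpler
-- what changed: Replaces A's index loop with a stride-2 range and an odd/even branch by a two-phase pass: join all characters' 8-bit codes into one bit string, pad it to a multiple of 16 with zeros, then chunk it into 16-character blocks.
import Mathlib
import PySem

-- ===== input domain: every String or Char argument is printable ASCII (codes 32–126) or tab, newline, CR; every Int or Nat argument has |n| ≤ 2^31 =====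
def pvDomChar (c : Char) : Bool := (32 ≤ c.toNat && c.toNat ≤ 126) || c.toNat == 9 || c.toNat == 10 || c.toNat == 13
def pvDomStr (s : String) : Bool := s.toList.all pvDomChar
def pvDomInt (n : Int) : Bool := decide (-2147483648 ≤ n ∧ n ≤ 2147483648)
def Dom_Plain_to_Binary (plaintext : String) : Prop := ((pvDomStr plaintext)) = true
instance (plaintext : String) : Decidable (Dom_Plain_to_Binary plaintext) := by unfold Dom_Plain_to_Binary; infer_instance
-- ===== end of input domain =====

-- B builds one joined bit string, pads it to a multiple of 16 and chunks it,
-- instead of A's stride-2 index loop with an odd/even branch; objective: simpler.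

-- ===== PORT A =====
-- format(ord(c), '08b'): the 8-bit binary representation of a character's code, MSB first
-- (exact for every character admitted by Dom, whose codes are < 256).
def pvBin8 (c : Char) : List Char :=
  (List.range 8).map (fun k => if c.toNat / 2 ^ (7 - k) % 2 = 1 then '1' else '0')

-- A's loop: for i in range(0, len, 2), branch on whether a second character remains.
def pvPairBlocks : List Char → List String
  | [] => []
  | [c] => [String.mk (pvBin8 c ++ ['0','0','0','0','0','0','0','0'])]
  | c1 :: c2 :: rest => String.mk (pvBin8 c1 ++ pvBin8 c2) :: pvPairBlocks rest

def Plain_to_Binary (plaintext : String) : List String :=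
  pvPairBlocks plaintext.toList

-- ===== PORT B =====
-- i = 0; while i < len(s): blocks.append(s[i:i+16]); i += 16
-- (i starts at 0 and only grows, so it is carried as a Nat)
def pvChunkLoop (s : List Char) (i : Nat) : List String :=
  if i < s.length then
    String.mk (PySem.List.slice s (some (i : Int)) (some ((i : Int) + 16))) :: pvChunkLoop s (i + 16)
  else []
  termination_by s.length - i

def Plain_to_Binary_alt (plaintext : String) : List String :=
  let s := plaintext.toList.flatMap pvBin8
  let s := s ++ List.replicate (PySem.Int.mod (-(s.length : Int)) 16).toNat '0'
  pvChunkLoop s 0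

-- ===== PRECONDITION & SPEC =====
def Spec_Plain_to_Binary (plaintext : String) (out : List String) : Prop := out = Plain_to_Binary_alt plaintext
instance (plaintext : String) (out : List String) : Decidable (Spec_Plain_to_Binary plaintext out) := by unfold Spec_Plain_to_Binary; infer_instance

-- ===== CLAIM (what is proved, stated in full; the proofs are below) =====
def Claim_equal_Plain_to_Binary : Prop := ∀ (plaintext : String), Dom_Plain_to_Binary plaintext → Spec_Plain_to_Binary plaintext (Plain_to_Binary plaintext)

-- ===== LEMMAS AND PROOFS =====

lemma pvBin8_length (c : Char) : (pvBin8 c).length = 8 := by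
  simp [pvBin8]

-- proof-side ghost recursion: chunk a list into 16-character blocks front to back
def pvChunk16 : List Char → List String
  | [] => []
  | c :: rest => String.mk ((c :: rest).take 16) :: pvChunk16 ((c :: rest).drop 16)
  termination_by l => l.length
  decreasing_by simp

lemma pvChunk16_nil : pvChunk16 [] = [] := pvChunk16.eq_1

lemma pvChunk16_cons (c : Char) (rest : List Char) :
    pvChunk16 (c :: rest) = String.mk ((c :: rest).take 16) :: pvChunk16 ((c :: rest).drop 16) :=
  pvChunk16.eq_2 c rest

lemma pvChunkLoop_eq_chunk16 (s : List Char) (i : Nat) :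
    pvChunkLoop s i = pvChunk16 (s.drop i) := by
  induction i using pvChunkLoop.induct (s := s) with
  | case1 i h ih =>
    rw [pvChunkLoop]
    simp only [h, if_true]
    have hsl : PySem.List.slice s (some (i : Int)) (some ((i : Int) + 16))
        = (s.drop i).take 16 := by
      have := PySem.List.slice_natCast_add (xs := s) (j := i) (n := 16)
      simpa using this
    cases hd : s.drop i with
    | nil => exfalso; have := congrArg List.length hd; simp at this; omega
    | cons c r =>
      rw [pvChunk16_cons, ← hd, hsl, ih, List.drop_drop]
  | case2 i h =>
    rw [pvChunkLoop]
    simp only [h, if_false]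
    rw [List.drop_of_length_le (by omega), pvChunk16_nil]

lemma pvChunk16_cons16 (a t : List Char) (ha : a.length = 16) :
    pvChunk16 (a ++ t) = String.mk a :: pvChunk16 t := by
  match a, ha with
  | c :: rest, ha =>
    rw [List.cons_append, pvChunk16_cons]
    have h1 : ((c :: rest) ++ t).take 16 = c :: rest := by
      rw [List.take_append_of_le_length (by omega)]
      exact List.take_of_length_le (by omega)
    have h2 : ((c :: rest) ++ t).drop 16 = t := by
      rw [List.drop_append_of_le_length (by omega), List.drop_of_length_le (by omega)]
      simp
    rw [← List.cons_append, h1, h2]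

lemma pvPad_key (l : List Char) :
    pvChunk16 (l.flatMap pvBin8 ++
      List.replicate (PySem.Int.mod (-((l.flatMap pvBin8).length : Int)) 16).toNat '0')
    = pvPairBlocks l := by
  induction l using pvPairBlocks.induct with
  | case1 => simp [pvChunk16_nil, pvPairBlocks, PySem.Int.mod]
  | case2 c =>
    have h : (([c].flatMap pvBin8).length : Int) = 8 := by
      simp [pvBin8_length]
    rw [h]
    have hm : (PySem.Int.mod (-(8 : Int)) 16).toNat = 8 := by decide
    rw [hm]
    have hlen : ([c].flatMap pvBin8 ++ List.replicate 8 '0').length = 16 := by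
      simp [pvBin8_length]
    rw [show [c].flatMap pvBin8 ++ List.replicate 8 '0'
          = ([c].flatMap pvBin8 ++ List.replicate 8 '0') ++ ([] : List Char) by simp,
        pvChunk16_cons16 _ _ hlen]
    simp [pvChunk16_nil, pvPairBlocks, List.replicate]
  | case3 c1 c2 rest ih =>
    have hflat : (c1 :: c2 :: rest).flatMap pvBin8
        = (pvBin8 c1 ++ pvBin8 c2) ++ rest.flatMap pvBin8 := by
      simp [List.flatMap_cons]
    have hlen12 : (pvBin8 c1 ++ pvBin8 c2).length = 16 := by
      simp [pvBin8_length]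
    have hmodeq : PySem.Int.mod (-(((c1 :: c2 :: rest).flatMap pvBin8).length : Int)) 16
        = PySem.Int.mod (-((rest.flatMap pvBin8).length : Int)) 16 := by
      have : (((c1 :: c2 :: rest).flatMap pvBin8).length : Int)
          = 16 + ((rest.flatMap pvBin8).length : Int) := by
        rw [hflat]; push_cast [List.length_append, hlen12]; ring
      rw [this, PySem.Int.mod_eq_emod_of_pos (by omega : (0:Int) < 16), PySem.Int.mod_eq_emod_of_pos (by omega : (0:Int) < 16)]
      omega
    rw [hmodeq, hflat, List.append_assoc,
        pvChunk16_cons16 _ _ hlen12, ih, pvPairBlocks]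

-- ===== VERDICT (by name: the statement is the Claim_ definition above) =====
theorem Plain_to_Binary_spec : Claim_equal_Plain_to_Binary := by
  intro p _
  unfold Spec_Plain_to_Binary Plain_to_Binary Plain_to_Binary_alt
  rw [pvChunkLoop_eq_chunk16, List.drop_zero, pvPad_key]
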